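-- pv_equiv track=rewrite | github.com/davidvonthenen/proposals | 2025_SCALE22/DemystifyingBuildingNLPModels/named-entity-recognition/helper_scripts/final-fixes.py | fix_I_tags
-- ===== SOURCE A (Python) =====
-- def fix_I_tags(sentences):
--     for sentence in sentences:
--         for idx, token in enumerate(sentence):
--             corrected_tags = []
--             for tag in token["tags"]:
--                 if tag.startswith("I-"):
--                     entity_type = tag[2:]
--                     prev_tags = sentence[idx - 1]["tags"] if idx > 0 else ["O"]
--                     prev_entity_types = set(
--                         t[2:] for t in prev_tags if t.startswith(("B-", "I-"))
--                     )
--                     if entity_type not in prev_entity_types: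
--                         # Incorrect I- tag, should be B-
--                         corrected_tag = "B-" + entity_type
--                     else:
--                         corrected_tag = tag
--                     corrected_tags.append(corrected_tag)
--                 else:
--                     corrected_tags.append(tag)
--             token["tags"] = corrected_tags
--     return sentences
-- ===== SOURCE B (Python) =====
-- def fix_I_tags(sentences):
--     for sentence in sentences:
--         # inverted index: entity type -> set of token positions carrying it (B- or I-)
--         positions = {}
--         for i, token in enumerate(sentence):
--             for t in token["tags"]:
--                 if t.startswith(("B-", "I-")):
--                     positions.setdefault(t[2:], set()).add(i)
--         for i, token in enumerate(sentence):
--             token["tags"] = [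
--                 "B-" + t[2:]
--                 if t.startswith("I-") and (i - 1) not in positions.get(t[2:], ())
--                 else t
--                 for t in token["tags"]
--             ]
--     return sentences
-- ===== Notes on version B (the rewrite author's own statement) =====
-- stated objective: alternative
-- what changed: B builds an inverted index per sentence (a dict mapping each entity type to the set of token positions whose original tags carry it, valid because correction never changes a tag's entity suffix) and then rewrites tags by a position lookup (i-1) in that index, instead of A recomputing the previous token's entity-type set inside the innermost per-tag loop from the mutated sentence.
import Mathlib
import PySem

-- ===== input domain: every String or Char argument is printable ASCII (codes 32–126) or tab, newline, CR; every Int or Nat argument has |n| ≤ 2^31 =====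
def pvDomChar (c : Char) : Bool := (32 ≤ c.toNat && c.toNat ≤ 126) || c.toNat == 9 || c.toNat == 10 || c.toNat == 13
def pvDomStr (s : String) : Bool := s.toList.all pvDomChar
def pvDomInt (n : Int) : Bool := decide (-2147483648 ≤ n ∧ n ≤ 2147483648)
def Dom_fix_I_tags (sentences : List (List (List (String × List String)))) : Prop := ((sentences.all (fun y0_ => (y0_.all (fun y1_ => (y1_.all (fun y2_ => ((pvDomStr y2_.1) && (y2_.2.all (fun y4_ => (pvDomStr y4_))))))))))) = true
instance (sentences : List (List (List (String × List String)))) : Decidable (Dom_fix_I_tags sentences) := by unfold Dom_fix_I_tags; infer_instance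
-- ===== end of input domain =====

-- B replaces A's per-tag recomputation of the previous token's entity-type set by an inverted index
-- built once per sentence (entity type -> set of token positions, from the original tags; sound
-- because correction never changes a tag's entity suffix); equivalence is about the return value
-- (both Pythons also mutate the token dicts in place in the same way).

-- ===== PORT A =====
-- token["tags"] (Pre_ guarantees the key is present, so the KeyError default [] is never used)
def pvGetTags (tok : List (String × List String)) : List String :=
  ((PySem.Dict.mk tok).get? "tags").getD []

-- entity suffix tag[2:]
def pvEnt (t : String) : String := PySem.Str.slice t (some 2) none

-- t.startswith(("B-", "I-"))
def pvIsBI (t : String) : Bool := PySem.Str.startswith t "B-" || PySem.Str.startswith t "I-"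

-- the body of A's innermost loop: correct one tag given the previous token's (current) tags
def pvCorrectA (prevTags : List String) (tag : String) : String :=
  if PySem.Str.startswith tag "I-" then
    let entityType := pvEnt tag
    let prevEntityTypes : PySem.Set String :=
      PySem.Set.ofList ((prevTags.filter pvIsBI).map pvEnt)
    if ¬ (PySem.Set.contains prevEntityTypes entityType) then "B-" ++ entityType else tag
  else tag

-- A's loop over one sentence: Python reads sentence[idx-1]["tags"] from the ALREADY-MUTATED list,
-- so the recursion carries the previous (updated) token's tags; idx = 0 uses the ["O"] sentinel.
def pvFixSentA (prevTags : List String) : List (List (String × List String)) → List (List (String × List String))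
  | [] => []
  | tok :: rest =>
    let correctedTags := (pvGetTags tok).foldl (fun acc t => acc ++ [pvCorrectA prevTags t]) []
    let tok' := ((PySem.Dict.mk tok).insert "tags" correctedTags).items
    tok' :: pvFixSentA (pvGetTags tok') rest

def fix_I_tags (sentences : List (List (List (String × List String)))) : List (List (List (String × List String))) :=
  sentences.map (fun sentence => pvFixSentA ["O"] sentence)

-- ===== PORT B =====
-- B's first inner loop: positions.setdefault(t[2:], set()).add(i) over one token's tags
def pvAddTok (d : PySem.Dict String (PySem.Set Int)) (i : Int) (tags : List String) : PySem.Dict String (PySem.Set Int) :=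
  tags.foldl (fun d t => if pvIsBI t then d.modify (pvEnt t) PySem.Set.empty (fun s => PySem.Set.add s i) else d) d

-- the inverted index: entity type -> set of token positions carrying it (from the original tags)
def pvBuildPos (sentence : List (List (String × List String))) : PySem.Dict String (PySem.Set Int) :=
  (PySem.List.enumerate sentence).foldl (fun d p => pvAddTok d p.1 (pvGetTags p.2)) PySem.Dict.empty

-- B's rewrite of one tag at position i: a position lookup in the index
def pvFixTagB (positions : PySem.Dict String (PySem.Set Int)) (i : Int) (t : String) : String :=
  if PySem.Str.startswith t "I-" && !(PySem.Set.contains (positions.getD (pvEnt t) PySem.Set.empty) (i - 1))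
  then "B-" ++ pvEnt t else t

def pvFixSentB (sentence : List (List (String × List String))) : List (List (String × List String)) :=
  let positions := pvBuildPos sentence
  (PySem.List.enumerate sentence).map (fun p =>
    ((PySem.Dict.mk p.2).insert "tags" ((pvGetTags p.2).map (pvFixTagB positions p.1))).items)

def fix_I_tags_alt (sentences : List (List (List (String × List String)))) : List (List (List (String × List String))) :=
  sentences.map pvFixSentB

-- ===== PRECONDITION & SPEC =====
-- Pre_ excludes exactly the inputs on which Python A raises KeyError: a token dict without a "tags" key.
def Pre_fix_I_tags (sentences : List (List (List (String × List String)))) : Prop :=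
  (sentences.all (fun sentence => sentence.all (fun tok => tok.any (fun kv => kv.1 == "tags")))) = true
instance (sentences : List (List (List (String × List String)))) : Decidable (Pre_fix_I_tags sentences) := by unfold Pre_fix_I_tags; infer_instance

def pvWitness_fix_I_tags : (List (List (List (String × List String)))) :=
  [[[("tags", ["I-PER", "O"])], [("tags", ["I-PER", "I-LOC"])]]]

def Spec_fix_I_tags (sentences : List (List (List (String × List String)))) (out : List (List (List (String × List String)))) : Prop := out = fix_I_tags_alt sentences
instance (sentences : List (List (List (String × List String)))) (out : List (List (List (String × List String)))) : Decidable (Spec_fix_I_tags sentences out) := by unfold Spec_fix_I_tags; infer_instance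

-- ===== CLAIM (what is proved, stated in full; the proofs are below) =====
def Claim_equal_fix_I_tags : Prop := ∀ (sentences : List (List (List (String × List String)))), Dom_fix_I_tags sentences → Pre_fix_I_tags sentences → Spec_fix_I_tags sentences (fix_I_tags sentences)

-- ===== LEMMAS AND PROOFS =====

-- proof-side bridge: the per-token entity-type list / set, and a zip-shaped correction pass
def pvTypeList (tags : List String) : List String := (tags.filter pvIsBI).map pvEnt

def pvTypeSet (tags : List String) : PySem.Set String := PySem.Set.ofList (pvTypeList tags)

def pvCorrectB (prev : PySem.Set String) (t : String) : String :=
  if PySem.Str.startswith t "I-" && !(PySem.Set.contains prev (pvEnt t)) then "B-" ++ pvEnt t else t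

-- the common zip-shaped middle form both ports are reduced to
def pvZipForm (prev0 : PySem.Set String) (s : List (List (String × List String))) : List (List (String × List String)) :=
  (s.zip (prev0 :: s.map (fun tok => pvTypeSet (pvGetTags tok)))).map (fun p =>
    ((PySem.Dict.mk p.1).insert "tags" ((pvGetTags p.1).map (pvCorrectB p.2))).items)

-- the two per-tag corrections agree when B's set is the type set of A's previous tags
theorem correctA_eq_correctB (prevTags : List String) (t : String) :
    pvCorrectA prevTags t = pvCorrectB (pvTypeSet prevTags) t := by
  cases h : PySem.Str.startswith t "I-" <;>
    cases hc : PySem.Set.contains (PySem.Set.ofList ((prevTags.filter pvIsBI).map pvEnt)) (pvEnt t) <;>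
      simp only [pvCorrectA, pvCorrectB, pvTypeSet, pvTypeList, h, hc, Bool.false_and, Bool.true_and,
        Bool.not_false, Bool.not_true, if_false, if_true, Bool.false_eq_true, not_false_iff]; simp

theorem isBI_Bpre (X : String) : pvIsBI ("B-" ++ X) = true := by
  simp [pvIsBI, PySem.Str.startswith_eq, String.toList_append, PySem.Chars.startswith]

theorem ent_Bpre (X : String) : pvEnt ("B-" ++ X) = X := by
  simp [pvEnt, PySem.Str.slice, PySem.List.slice_from, String.toList_append,
        String.ofList_toList]

-- correction never changes whether a tag carries an entity type, nor which one
theorem isBI_correctB (p : PySem.Set String) (t : String) : pvIsBI (pvCorrectB p t) = pvIsBI t := by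
  simp only [pvCorrectB]
  split
  · next h =>
    have hI : PySem.Str.startswith t "I-" = true := by
      rcases Bool.and_eq_true .. |>.mp h with ⟨h1, _⟩; exact h1
    rw [isBI_Bpre]; simp only [pvIsBI, hI, Bool.or_true]
  · rfl

theorem ent_correctB (p : PySem.Set String) (t : String) : pvEnt (pvCorrectB p t) = pvEnt t := by
  simp only [pvCorrectB]
  split
  · next h =>
    have hI : PySem.Str.startswith t "I-" = true := by
      rcases Bool.and_eq_true .. |>.mp h with ⟨h1, _⟩; exact h1
    rw [ent_Bpre]
  · rfl

-- hence the per-token type list is invariant under correction (as a LIST, so a fortiori as a set)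
theorem typeList_map_correctB (p : PySem.Set String) (tags : List String) :
    pvTypeList (tags.map (pvCorrectB p)) = pvTypeList tags := by
  induction tags with
  | nil => rfl
  | cons t ts ih =>
    simp only [pvTypeList, List.map_cons, List.filter_cons, isBI_correctB] at ih ⊢
    by_cases h : pvIsBI t = true
    · simp [h, ent_correctB, ih]
    · simp [h, ih]

theorem typeSet_map_correctB (p : PySem.Set String) (tags : List String) :
    pvTypeSet (tags.map (pvCorrectB p)) = pvTypeSet tags := by
  simp [pvTypeSet, typeList_map_correctB]

-- reading back "tags" from the updated token dict gives the corrected list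
theorem getTags_insert (tok : List (String × List String)) (v : List String) :
    pvGetTags (((PySem.Dict.mk tok).insert "tags" v).items) = v := by
  simp only [pvGetTags]
  rw [show (PySem.Dict.mk (((PySem.Dict.mk tok).insert "tags" v).items)) = (PySem.Dict.mk tok).insert "tags" v from rfl,
     PySem.Dict.get?_insert_self]
  rfl

-- A's mutating sentence loop equals the zip-shaped pass, for any previous-tags seed
theorem fixSentA_eq (s : List (List (String × List String))) (prevTags : List String) :
    pvFixSentA prevTags s = pvZipForm (pvTypeSet prevTags) s := by
  induction s generalizing prevTags with
  | nil => rfl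
  | cons tok rest ih =>
    simp only [pvFixSentA, pvZipForm, PySem.List.foldl_append_singleton_eq_map, List.nil_append,
      List.map_cons, List.zip_cons_cons]
    have hmap : (pvGetTags tok).map (pvCorrectA prevTags)
        = (pvGetTags tok).map (pvCorrectB (pvTypeSet prevTags)) :=
      List.map_congr_left (fun t _ => correctA_eq_correctB prevTags t)
    rw [hmap, ih]
    simp only [pvZipForm]
    congr 2
    rw [getTags_insert, typeSet_map_correctB]

-- the ["O"] sentinel contributes no entity types
theorem typeSet_O : pvTypeSet ["O"] = PySem.Set.empty := by decide

-- membership in the index after B's inner loop over one token's tags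
theorem addTok_mem (d : PySem.Dict String (PySem.Set Int)) (i : Int) (tags : List String)
    (X : String) (j : Int) :
    j ∈ (pvAddTok d i tags).getD X PySem.Set.empty ↔
      j ∈ d.getD X PySem.Set.empty ∨ (j = i ∧ X ∈ pvTypeList tags) := by
  induction tags generalizing d with
  | nil => simp [pvAddTok, pvTypeList]
  | cons t ts ih =>
    simp only [pvAddTok] at ih ⊢
    rw [List.foldl_cons]
    by_cases h : pvIsBI t = true
    · rw [if_pos h, ih, PySem.Dict.getD_modify]
      have hT : pvTypeList (t :: ts) = pvEnt t :: pvTypeList ts := by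
        simp [pvTypeList, h]
      rw [hT]
      by_cases hX : X = pvEnt t
      · subst hX
        rw [if_pos rfl]
        simp only [PySem.Set.mem_add, List.mem_cons]
        tauto
      · rw [if_neg hX]
        simp only [List.mem_cons]
        tauto
    · rw [if_neg h, ih]
      have hT : pvTypeList (t :: ts) = pvTypeList ts := by
        simp [pvTypeList, h]
      rw [hT]

-- membership in the index built over an enumerated suffix starting at index st
theorem buildFold_mem (xs : List (List (String × List String))) (st : Int)
    (d : PySem.Dict String (PySem.Set Int)) (X : String) (j : Int) :
    j ∈ ((PySem.List.enumerate xs st).foldl (fun d p => pvAddTok d p.1 (pvGetTags p.2)) d).getD X PySem.Set.empty ↔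
      j ∈ d.getD X PySem.Set.empty ∨
        ∃ k : Nat, ∃ _ : k < xs.length, j = st + k ∧ X ∈ pvTypeList (pvGetTags xs[k]) := by
  induction xs generalizing st d with
  | nil => simp [PySem.List.enumerate_nil]
  | cons x rest ih =>
    rw [PySem.List.enumerate_cons, List.foldl_cons, ih, addTok_mem]
    constructor
    · rintro ((hd | ⟨hj, hx⟩) | ⟨k, hk, hj, hX⟩)
      · exact Or.inl hd
      · exact Or.inr ⟨0, by simp, by omega, by simpa using hx⟩
      · exact Or.inr ⟨k + 1, by simp; omega, by push_cast; omega, by simpa using hX⟩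
    · rintro (hd | ⟨k, hk, hj, hX⟩)
      · exact Or.inl (Or.inl hd)
      · cases k with
        | zero => exact Or.inl (Or.inr ⟨by omega, by simpa using hX⟩)
        | succ k =>
          refine Or.inr ⟨k, by simpa using hk, by push_cast at hj ⊢; omega, by simpa using hX⟩

-- the index lookup at i-1 coincides with the previous token's type set (empty set at i = 0)
theorem pos_lookup (s : List (List (String × List String))) (i : Nat) (hi : i < s.length) (X : String) :
    PySem.Set.contains ((pvBuildPos s).getD X PySem.Set.empty) ((i : Int) - 1)
      = PySem.Set.contains
          ((PySem.Set.empty :: s.map (fun tok => pvTypeSet (pvGetTags tok)))[i]'(by simp; omega)) X := by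
  have hmem : ∀ j : Int, j ∈ (pvBuildPos s).getD X PySem.Set.empty ↔
      ∃ k : Nat, ∃ _ : k < s.length, j = k ∧ X ∈ pvTypeList (pvGetTags s[k]) := by
    intro j
    unfold pvBuildPos
    rw [buildFold_mem]
    simp [PySem.Dict.getD_empty, PySem.Set.empty]
  rw [Bool.eq_iff_iff]
  simp only [PySem.Set.contains, List.contains_iff_mem]
  rw [hmem]
  cases i with
  | zero =>
    simp only [List.getElem_cons_zero, Nat.cast_zero]
    constructor
    · rintro ⟨k, hk, hj, _⟩; omega
    · intro hX; exact absurd hX (by simp [PySem.Set.empty])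
  | succ n =>
    have hn : n < s.length := by omega
    simp only [List.getElem_cons_succ, List.getElem_map]
    rw [show (pvTypeSet (pvGetTags s[n]) : List String) = PySem.Set.ofList (pvTypeList (pvGetTags s[n])) from rfl,
        PySem.Set.mem_ofList]
    constructor
    · rintro ⟨k, hk, hj, hX⟩
      have : k = n := by omega
      subst this; exact hX
    · intro hX; exact ⟨n, hn, by push_cast; omega, hX⟩

-- B's index pass equals the zip-shaped pass with the empty set in front
theorem fixSentB_eq (s : List (List (String × List String))) :
    pvFixSentB s = pvZipForm PySem.Set.empty s := by
  unfold pvFixSentB pvZipForm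
  apply List.ext_getElem
  · simp [PySem.List.length_enumerate]
  · intro i h1 h2
    have hi : i < s.length := by simpa [PySem.List.length_enumerate] using h1
    rw [List.getElem_map, List.getElem_map, PySem.List.getElem_enumerate, List.getElem_zip]
    simp only [zero_add]
    have hmap : (pvGetTags s[i]).map (pvFixTagB (pvBuildPos s) (i : Int))
        = (pvGetTags s[i]).map
            (pvCorrectB ((PySem.Set.empty :: s.map (fun tok => pvTypeSet (pvGetTags tok)))[i]'(by simp; omega))) := by
      apply List.map_congr_left
      intro t _
      unfold pvFixTagB pvCorrectB
      rw [pos_lookup s i hi (pvEnt t)]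
    rw [hmap]

theorem fixSent_eq (s : List (List (String × List String))) :
    pvFixSentA ["O"] s = pvFixSentB s := by
  rw [fixSentA_eq, typeSet_O, fixSentB_eq]

-- ===== VERDICT (by name: the statement is the Claim_ definition above) =====
theorem fix_I_tags_spec : Claim_equal_fix_I_tags := by
  intro sentences _ _
  unfold Spec_fix_I_tags fix_I_tags fix_I_tags_alt
  exact List.map_congr_left (fun s _ => fixSent_eq s)
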